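-- pv_equiv track=rewrite | github.com/aryabartar/BSc-HWc | DS/Codes/JUST4FUN/max-sum-subarray.py | max_crossing_subarray
-- ===== SOURCE A (Python) =====
-- def max_crossing_subarray(ar, low, mid, high):
--     left_sum = -10000 #big value
--     sum = 0
--
--     for i in range(mid, low - 1, -1):
--         sum = sum + ar[i]
--         if (sum > left_sum):
--             left_sum = sum
--
--     right_sum = -10000#big value
--     sum = 0
--
--     for i in range(mid + 1, high + 1):
--         sum = sum + ar[i]
--         if (sum > right_sum):
--             right_sum = sum
--
--     return left_sum + right_sum
-- ===== SOURCE B (Python) =====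
-- def max_crossing_subarray(ar, low, mid, high):
--     left_sum = -10000
--     if low <= mid:
--         pref = [0]
--         for i in range(low, mid + 1):
--             pref.append(pref[-1] + ar[i])
--         cand = pref[-1] - min(pref[:-1])
--         if cand > left_sum:
--             left_sum = cand
--     right_sum = -10000
--     if mid < high:
--         pref = [0]
--         for i in range(mid + 1, high + 1):
--             pref.append(pref[-1] + ar[i])
--         cand = max(pref[1:])
--         if cand > right_sum:
--             right_sum = cand
--     return left_sum + right_sum
-- ===== Notes on version B (the rewrite author's own statement) =====
-- stated objective: alternative
-- what changed: Replaces the two running-best scans (running max of partial sums outward from mid) with a build-then-reduce shape: build each side's prefix-sum list over its index range and reduce it, left best = total minus the minimum proper prefix sum, right best = maximum non-empty prefix sum, each overriding the -10000 seed only when it beats it.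
import Mathlib
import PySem

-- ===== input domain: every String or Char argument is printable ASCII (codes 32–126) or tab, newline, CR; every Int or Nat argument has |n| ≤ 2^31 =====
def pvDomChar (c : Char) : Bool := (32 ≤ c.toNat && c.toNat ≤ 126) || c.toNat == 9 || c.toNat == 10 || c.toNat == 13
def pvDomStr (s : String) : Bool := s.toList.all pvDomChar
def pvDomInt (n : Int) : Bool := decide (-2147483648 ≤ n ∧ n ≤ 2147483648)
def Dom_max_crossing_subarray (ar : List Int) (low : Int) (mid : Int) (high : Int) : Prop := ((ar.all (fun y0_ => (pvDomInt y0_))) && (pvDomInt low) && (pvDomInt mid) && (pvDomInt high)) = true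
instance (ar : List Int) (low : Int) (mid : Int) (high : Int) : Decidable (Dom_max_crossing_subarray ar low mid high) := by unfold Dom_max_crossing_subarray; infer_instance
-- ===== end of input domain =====

-- B replaces the two outward running-best scans with a build-then-reduce shape: it builds each side's
-- prefix-sum list and reduces it ("total minus minimum proper prefix sum" on the left, "maximum
-- non-empty prefix sum" on the right) — an alternative decomposition at the same cost.


-- ===== PORT A =====
-- A's for-loop over indices: state (sum, best); `none` = IndexError from ar[i]
def pvA_loop (ar : List Int) (idxs : List Int) (s : Int) (best : Int) : Option (Int × Int) :=
  match idxs with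
  | [] => some (s, best)
  | i :: rest =>
    match PySem.List.pyGet? ar i with
    | none => none
    | some v => pvA_loop ar rest (s + v) (if s + v > best then s + v else best)

def max_crossing_subarray (ar : List Int) (low : Int) (mid : Int) (high : Int) : Int :=
  match pvA_loop ar (PySem.List.pyRange mid (low - 1) (-1)) 0 (-10000),
        pvA_loop ar (PySem.List.pyRange (mid + 1) (high + 1) 1) 0 (-10000) with
  | some (_, left_sum), some (_, right_sum) => left_sum + right_sum
  | _, _ => 0  -- unreachable under Pre_ (A raises IndexError)

-- ===== PORT B =====
-- B's `for i in range(..): pref.append(pref[-1] + ar[i])` loop; `none` = IndexError from ar[i]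
def pvB_build (ar : List Int) (idxs : List Int) (pref : List Int) : Option (List Int) :=
  match idxs with
  | [] => some pref
  | i :: rest =>
    match PySem.List.pyGet? ar i with
    | none => none
    | some v => pvB_build ar rest (pref ++ [pref.getLastD 0 + v])

def max_crossing_subarray_alt (ar : List Int) (low : Int) (mid : Int) (high : Int) : Int :=
  let left_sum : Int := -10000
  let left_sum : Int :=
    if low ≤ mid then
      match pvB_build ar (PySem.List.pyRange low (mid + 1) 1) [0] with
      | none => 0  -- unreachable under Pre_ (B raises IndexError)
      | some pref =>
        -- cand = pref[-1] - min(pref[:-1])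
        let cand := pref.getLastD 0 - (PySem.List.min? pref.dropLast (fun y => y)).getD 0
        if cand > left_sum then cand else left_sum
    else left_sum
  let right_sum : Int := -10000
  let right_sum : Int :=
    if mid < high then
      match pvB_build ar (PySem.List.pyRange (mid + 1) (high + 1) 1) [0] with
      | none => 0  -- unreachable under Pre_ (B raises IndexError)
      | some pref =>
        -- cand = max(pref[1:])
        let cand := (PySem.List.max? pref.tail (fun y => y)).getD 0
        if cand > right_sum then cand else right_sum
    else right_sum
  left_sum + right_sum

-- ===== PRECONDITION & SPEC =====
-- Pre_ = exactly the inputs on which A returns: every index its two loops touch is in Python's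
-- range [-len(ar), len(ar)); outside it both A and B raise IndexError.
def Pre_max_crossing_subarray (ar : List Int) (low : Int) (mid : Int) (high : Int) : Prop :=
  (low ≤ mid → -(ar.length : Int) ≤ low ∧ mid < (ar.length : Int)) ∧
  (mid < high → -(ar.length : Int) ≤ mid + 1 ∧ high < (ar.length : Int))
instance (ar : List Int) (low : Int) (mid : Int) (high : Int) : Decidable (Pre_max_crossing_subarray ar low mid high) := by unfold Pre_max_crossing_subarray; infer_instance
def pvWitness_max_crossing_subarray : List Int × Int × Int × Int := ([1, -2, 3, 4], 0, 1, 3)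

def Spec_max_crossing_subarray (ar : List Int) (low : Int) (mid : Int) (high : Int) (out : Int) : Prop := out = max_crossing_subarray_alt ar low mid high
instance (ar : List Int) (low : Int) (mid : Int) (high : Int) (out : Int) : Decidable (Spec_max_crossing_subarray ar low mid high out) := by unfold Spec_max_crossing_subarray; infer_instance

-- ===== CLAIM (what is proved, stated in full; the proofs are below) =====
def Claim_equal_max_crossing_subarray : Prop := ∀ (ar : List Int) (low : Int) (mid : Int) (high : Int), Dom_max_crossing_subarray ar low mid high → Pre_max_crossing_subarray ar low mid high → Spec_max_crossing_subarray ar low mid high (max_crossing_subarray ar low mid high)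

-- ===== LEMMAS AND PROOFS =====

-- A's loop on the list of VALUES it reads
def pvBest : List Int → Int → Int → Int × Int
  | [], s, b => (s, b)
  | x :: r, s, b => pvBest r (s + x) (if s + x > b then s + x else b)

-- the prefix-sum list B's build loop produces, on the list of VALUES it reads
def pvB_pref (start : Int) : List Int → List Int
  | [] => [start]
  | x :: rest => start :: pvB_pref (start + x) rest

-- minimum over all suffix sums (including the empty and the full suffix)
def allSufMin : List Int → Int
  | [] => 0
  | x :: t => min (x + t.sum) (allSufMin t)

-- minimum / maximum over all prefix sums (including the empty prefix)
def minPref : List Int → Int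
  | [] => 0
  | x :: t => min 0 (x + minPref t)

def maxPref : List Int → Int
  | [] => 0
  | x :: t => max 0 (x + maxPref t)

theorem pyGet?_eq_some_pyGetD (ar : List Int) (i : Int) (h : PySem.Raise.InRange ar.length i) :
    PySem.List.pyGet? ar i = some (PySem.List.pyGetD ar i 0) := by
  cases hg : PySem.List.pyGet? ar i with
  | none => exact absurd h ((PySem.List.pyGet?_eq_none_iff _ _).mp hg)
  | some v => simp [PySem.List.pyGetD, hg]

theorem pvA_loop_some (ar : List Int) : ∀ (idxs : List Int) (s b : Int),
    (∀ i ∈ idxs, PySem.Raise.InRange ar.length i) →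
    pvA_loop ar idxs s b = some (pvBest (idxs.map (fun i => PySem.List.pyGetD ar i 0)) s b) := by
  intro idxs
  induction idxs with
  | nil => intro s b _; rfl
  | cons i rest ih =>
    intro s b h
    simp only [pvA_loop, pyGet?_eq_some_pyGetD ar i (h i (by simp)), List.map_cons, pvBest]
    exact ih _ _ (fun j hj => h j (by simp [hj]))

theorem pvB_build_some (ar : List Int) : ∀ (idxs : List Int) (acc : List Int) (s : Int),
    (∀ i ∈ idxs, PySem.Raise.InRange ar.length i) →
    pvB_build ar idxs (acc ++ [s]) =
      some (acc ++ pvB_pref s (idxs.map (fun i => PySem.List.pyGetD ar i 0))) := by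
  intro idxs
  induction idxs with
  | nil => intro acc s _; simp [pvB_build, pvB_pref]
  | cons i rest ih =>
    intro acc s h
    simp only [pvB_build, pyGet?_eq_some_pyGetD ar i (h i (by simp)), List.map_cons, pvB_pref]
    rw [show (acc ++ [s]).getLastD 0 = s by simp,
      ih (acc ++ [s]) _ (fun j hj => h j (by simp [hj]))]
    simp

theorem pvBest_snd (l : List Int) : ∀ (s b : Int), l ≠ [] →
    (pvBest l s b).2 = max b (s + l.sum - allSufMin l.tail) := by
  induction l with
  | nil => intro s b h; exact absurd rfl h
  | cons x r ih =>
    intro s b _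
    cases r with
    | nil => simp only [pvBest, allSufMin, List.sum_cons, List.sum_nil, List.tail_cons]; split_ifs <;> omega
    | cons y t =>
      rw [show pvBest (x :: y :: t) s b = pvBest (y :: t) (s + x) (if s + x > b then s + x else b) from rfl,
        ih _ _ (by simp), List.tail_cons]
      simp only [allSufMin, List.sum_cons, List.tail_cons]
      split_ifs <;> omega

theorem allSufMin_append_singleton (m : List Int) (x : Int) :
    allSufMin (m ++ [x]) = min 0 (x + allSufMin m) := by
  induction m with
  | nil => simp [allSufMin]; omega
  | cons y m' ih =>
    simp only [List.cons_append, allSufMin, List.sum_append, List.sum_cons, List.sum_nil, ih]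
    omega

theorem allSufMin_reverse (p : List Int) : allSufMin p.reverse = minPref p := by
  induction p with
  | nil => rfl
  | cons x t ih =>
    rw [List.reverse_cons, allSufMin_append_singleton, ih]
    rfl

theorem maxPref_eq (r : List Int) : maxPref r = r.sum - allSufMin r := by
  induction r with
  | nil => rfl
  | cons y t ih => simp only [maxPref, allSufMin, List.sum_cons, ih]; omega

theorem pvB_pref_getLastD (p : List Int) : ∀ (s d : Int), (pvB_pref s p).getLastD d = s + p.sum := by
  induction p with
  | nil => intro s d; simp [pvB_pref]
  | cons x r ih =>
    intro s d
    simp only [pvB_pref, List.sum_cons]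
    rw [List.getLastD_cons]
    cases r with
    | nil => simp [pvB_pref]
    | cons y t => rw [ih]; ring

theorem pvB_pref_dropLast (p : List Int) : ∀ (s : Int), p ≠ [] →
    (pvB_pref s p).dropLast = pvB_pref s p.dropLast := by
  induction p with
  | nil => intro s h; exact absurd rfl h
  | cons x r ih =>
    intro s _
    cases r with
    | nil => rfl
    | cons y t =>
      have hne : pvB_pref (s + x) (y :: t) ≠ [] := by cases t <;> simp [pvB_pref]
      rw [show pvB_pref s (x :: y :: t) = s :: pvB_pref (s + x) (y :: t) from rfl,
        List.dropLast_cons_of_ne_nil hne, ih _ (by simp),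
        List.dropLast_cons_of_ne_nil (show (y :: t) ≠ [] by simp)]
      rfl

theorem pvB_pref_foldl_min (p : List Int) : ∀ (s a : Int),
    (pvB_pref s p).foldl min a = min a (s + minPref p) := by
  induction p with
  | nil => intro s a; simp [pvB_pref, minPref]
  | cons x r ih =>
    intro s a
    simp only [pvB_pref, List.foldl_cons, ih, minPref]
    omega

theorem pvB_pref_min? (p : List Int) (s : Int) :
    PySem.List.min? (pvB_pref s p) (fun y => y) = some (s + minPref p) := by
  cases p with
  | nil => simp [pvB_pref, PySem.List.min?_id_cons, minPref]
  | cons x r =>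
    rw [show pvB_pref s (x :: r) = s :: pvB_pref (s + x) r from rfl, PySem.List.min?_id_cons,
      pvB_pref_foldl_min]
    simp only [minPref]
    congr 1
    omega

theorem pvB_pref_foldl_max (p : List Int) : ∀ (s a : Int),
    (pvB_pref s p).foldl max a = max a (s + maxPref p) := by
  induction p with
  | nil => intro s a; simp [pvB_pref, maxPref]
  | cons x r ih =>
    intro s a
    simp only [pvB_pref, List.foldl_cons, ih, maxPref]
    omega

theorem pvB_pref_max? (p : List Int) (s : Int) :
    PySem.List.max? (pvB_pref s p) (fun y => y) = some (s + maxPref p) := by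
  cases p with
  | nil => simp [pvB_pref, PySem.List.max?_id_cons, maxPref]
  | cons x r =>
    rw [show pvB_pref s (x :: r) = s :: pvB_pref (s + x) r from rfl, PySem.List.max?_id_cons,
      pvB_pref_foldl_max]
    simp only [maxPref]
    congr 1
    omega

-- A's left loop computes exactly B's left result (non-empty left side)
theorem left_side (ar : List Int) (low mid : Int) (h0 : -(ar.length : Int) ≤ low) (hlm : low ≤ mid)
    (hlt : mid < (ar.length : Int)) :
    (pvA_loop ar (PySem.List.pyRange mid (low - 1) (-1)) 0 (-10000)).map Prod.snd =
      some (match pvB_build ar (PySem.List.pyRange low (mid + 1) 1) [0] with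
            | none => 0
            | some pref =>
              if pref.getLastD 0 - (PySem.List.min? pref.dropLast (fun y => y)).getD 0 > -10000 then
                pref.getLastD 0 - (PySem.List.min? pref.dropLast (fun y => y)).getD 0
              else -10000) := by
  have hbd : ∀ i ∈ PySem.List.pyRange low (mid + 1) 1, PySem.Raise.InRange ar.length i := by
    intro i hi
    rw [PySem.List.mem_pyRange_one] at hi
    simp only [PySem.Raise.InRange]
    omega
  have hidx : PySem.List.pyRange mid (low - 1) (-1) = (PySem.List.pyRange low (mid + 1) 1).reverse := by
    rw [PySem.List.pyRange_neg_one_eq_reverse, show low - 1 + 1 = low by ring]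
  have hbd' : ∀ i ∈ (PySem.List.pyRange low (mid + 1) 1).reverse, PySem.Raise.InRange ar.length i := by
    intro i hi
    exact hbd i (List.mem_reverse.mp hi)
  set seg := (PySem.List.pyRange low (mid + 1) 1).map (fun i => PySem.List.pyGetD ar i 0) with hsegdef
  have hsegne : seg ≠ [] := by
    have : seg.length = ((mid + 1) - low).toNat := by
      simp [hsegdef, PySem.List.length_pyRange_one]
    intro hnil
    rw [hnil] at this
    simp at this
    omega
  rw [hidx, pvA_loop_some ar _ _ _ hbd', List.map_reverse, ← hsegdef, Option.map_some,
    show ([0] : List Int) = [] ++ [0] from rfl, pvB_build_some ar _ _ _ hbd, ← hsegdef,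
    List.nil_append]
  simp only []
  rw [pvBest_snd _ _ _ (by rw [Ne, List.reverse_eq_nil_iff]; exact hsegne)]
  have hrev : (seg.reverse).sum = seg.sum := List.sum_reverse_int seg
  rw [List.tail_reverse, allSufMin_reverse, hrev]
  rw [pvB_pref_getLastD, pvB_pref_dropLast _ _ hsegne, pvB_pref_min?]
  clear_value seg
  simp only [Option.getD_some, Option.some_inj, max_def]
  split_ifs <;> linarith

-- A's right loop computes exactly B's right result (non-empty right side)
theorem right_side (ar : List Int) (mid high : Int) (h0 : -(ar.length : Int) ≤ mid + 1)
    (hmh : mid < high) (hlt : high < (ar.length : Int)) :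
    (pvA_loop ar (PySem.List.pyRange (mid + 1) (high + 1) 1) 0 (-10000)).map Prod.snd =
      some (match pvB_build ar (PySem.List.pyRange (mid + 1) (high + 1) 1) [0] with
            | none => 0
            | some pref =>
              if (PySem.List.max? pref.tail (fun y => y)).getD 0 > -10000 then
                (PySem.List.max? pref.tail (fun y => y)).getD 0
              else -10000) := by
  have hbd : ∀ i ∈ PySem.List.pyRange (mid + 1) (high + 1) 1, PySem.Raise.InRange ar.length i := by
    intro i hi
    rw [PySem.List.mem_pyRange_one] at hi
    simp only [PySem.Raise.InRange]
    omega
  set seg := (PySem.List.pyRange (mid + 1) (high + 1) 1).map (fun i => PySem.List.pyGetD ar i 0) with hsegdef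
  have hsegne : seg ≠ [] := by
    have : seg.length = ((high + 1) - (mid + 1)).toNat := by
      simp [hsegdef, PySem.List.length_pyRange_one]
    intro hnil
    rw [hnil] at this
    simp at this
    omega
  rw [pvA_loop_some ar _ _ _ hbd, ← hsegdef, Option.map_some,
    show ([0] : List Int) = [] ++ [0] from rfl, pvB_build_some ar _ _ _ hbd, ← hsegdef,
    List.nil_append]
  simp only []
  clear_value seg
  rw [pvBest_snd _ _ _ hsegne]
  cases hc : seg with
  | nil => exact absurd hc hsegne
  | cons x r =>
    rw [show pvB_pref 0 (x :: r) = 0 :: pvB_pref (0 + x) r from rfl]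
    simp only [List.tail_cons]
    rw [pvB_pref_max?]
    simp only [Option.getD_some, Option.some_inj, List.sum_cons, maxPref_eq, max_def]
    split_ifs <;> linarith

-- ===== VERDICT (by name: the statement is the Claim_ definition above) =====
theorem max_crossing_subarray_spec : Claim_equal_max_crossing_subarray := by
  intro ar low mid high _ hpre
  obtain ⟨hL, hR⟩ := hpre
  unfold Spec_max_crossing_subarray
  have hB : max_crossing_subarray_alt ar low mid high =
      (if low ≤ mid then
        (match pvB_build ar (PySem.List.pyRange low (mid + 1) 1) [0] with
         | none => 0
         | some pref =>
           if pref.getLastD 0 - (PySem.List.min? pref.dropLast (fun y => y)).getD 0 > -10000 then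
             pref.getLastD 0 - (PySem.List.min? pref.dropLast (fun y => y)).getD 0
           else -10000)
      else -10000) +
      (if mid < high then
        (match pvB_build ar (PySem.List.pyRange (mid + 1) (high + 1) 1) [0] with
         | none => 0
         | some pref =>
           if (PySem.List.max? pref.tail (fun y => y)).getD 0 > -10000 then
             (PySem.List.max? pref.tail (fun y => y)).getD 0
           else -10000)
      else -10000) := rfl
  have hLv : (pvA_loop ar (PySem.List.pyRange mid (low - 1) (-1)) 0 (-10000)).map Prod.snd =
      some (if low ≤ mid then
        (match pvB_build ar (PySem.List.pyRange low (mid + 1) 1) [0] with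
         | none => 0
         | some pref =>
           if pref.getLastD 0 - (PySem.List.min? pref.dropLast (fun y => y)).getD 0 > -10000 then
             pref.getLastD 0 - (PySem.List.min? pref.dropLast (fun y => y)).getD 0
           else -10000)
      else -10000) := by
    by_cases hlm : low ≤ mid
    · obtain ⟨h0, hlt⟩ := hL hlm
      rw [if_pos hlm]
      exact left_side ar low mid h0 hlm hlt
    · rw [if_neg hlm, PySem.List.pyRange_neg_one_eq_nil (by omega)]
      rfl
  have hRv : (pvA_loop ar (PySem.List.pyRange (mid + 1) (high + 1) 1) 0 (-10000)).map Prod.snd =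
      some (if mid < high then
        (match pvB_build ar (PySem.List.pyRange (mid + 1) (high + 1) 1) [0] with
         | none => 0
         | some pref =>
           if (PySem.List.max? pref.tail (fun y => y)).getD 0 > -10000 then
             (PySem.List.max? pref.tail (fun y => y)).getD 0
           else -10000)
      else -10000) := by
    by_cases hmh : mid < high
    · obtain ⟨h0, hlt⟩ := hR hmh
      rw [if_pos hmh]
      exact right_side ar mid high h0 hmh hlt
    · rw [if_neg hmh, PySem.List.pyRange_one_eq_nil (by omega)]
      rfl
  obtain ⟨pL, hpL, hpL2⟩ := Option.map_eq_some_iff.mp hLv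
  obtain ⟨pR, hpR, hpR2⟩ := Option.map_eq_some_iff.mp hRv
  rw [hB, max_crossing_subarray, hpL, hpR]
  obtain ⟨sL, vL⟩ := pL
  obtain ⟨sR, vR⟩ := pR
  simpa using congrArg₂ (· + ·) hpL2 hpR2
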